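-- pv_equiv track=rewrite | github.com/geoffbelknap/agency | images/body/body.py | _xpia_scan_cached_result
-- ===== SOURCE A (Python) =====
-- def _xpia_scan_cached_result(content: str) -> bool:
--     """Check cached content for injection patterns before use.
--
--     Returns True if content is safe to use.
--     Basic local check for obvious injection patterns.
--     Full enforcer XPIA scanning happens when the content enters the LLM path.
--     """
--     suspicious_patterns = [
--         "ignore previous instructions",
--         "you are now",
--         "system:",
--         "disregard",
--         "override your",
--     ]
--     content_lower = content.lower()
--     for pattern in suspicious_patterns:
--         if pattern in content_lower:
--             return False
--     return True
-- ===== SOURCE B (Python) =====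
-- _XPIA_PATTERNS = (
--     "ignore previous instructions",
--     "you are now",
--     "system:",
--     "disregard",
--     "override your",
-- )
--
--
-- def _xpia_scan_cached_result(content: str) -> bool:
--     """Single left-to-right pass: at each position, test whether any
--     suspicious pattern begins there; safe iff no position matches."""
--     cl = content.lower()
--     return not any(
--         cl.startswith(p, i) for i in range(len(cl) + 1) for p in _XPIA_PATTERNS
--     )
-- ===== Notes on version B (the rewrite author's own statement) =====
-- stated objective: alternative
-- what changed: Replaced the five separate 'pattern in content' substring scans with a single left-to-right pass over the lowercased text that tests at each position whether any pattern starts there.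
import Mathlib
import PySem

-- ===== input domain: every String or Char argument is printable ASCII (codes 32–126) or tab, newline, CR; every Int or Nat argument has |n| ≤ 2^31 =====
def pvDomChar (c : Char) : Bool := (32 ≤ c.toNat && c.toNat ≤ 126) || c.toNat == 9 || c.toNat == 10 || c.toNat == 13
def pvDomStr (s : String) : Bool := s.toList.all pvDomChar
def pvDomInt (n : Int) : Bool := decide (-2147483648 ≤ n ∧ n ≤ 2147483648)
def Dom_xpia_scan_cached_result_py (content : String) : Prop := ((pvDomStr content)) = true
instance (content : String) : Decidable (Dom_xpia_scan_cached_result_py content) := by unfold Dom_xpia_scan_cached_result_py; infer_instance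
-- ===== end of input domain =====

-- B replaces A's five separate substring scans with one left-to-right pass that
-- tests each position for a pattern start (alternative decomposition, same result).


-- ===== PORT A =====
-- A's fixed pattern list
def pvPatternsA : List String :=
  ["ignore previous instructions", "you are now", "system:", "disregard", "override your"]

-- A's loop: return False on the first pattern found, True after the loop
def pvScanLoopA (patterns : List String) (contentLower : String) : Bool :=
  match patterns with
  | [] => true
  | p :: rest =>
    if PySem.Str.isIn p contentLower then false else pvScanLoopA rest contentLower

def xpia_scan_cached_result_py (content : String) : Bool :=
  pvScanLoopA pvPatternsA (PySem.Str.lower content)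

-- ===== PORT B =====
-- B's fixed pattern list (as character lists; B works position-wise)
def pvPatternsB : List (List Char) :=
  ["ignore previous instructions".toList, "you are now".toList, "system:".toList,
   "disregard".toList, "override your".toList]

-- B's single pass: at each position (each suffix, including the empty one),
-- does some pattern start here?
def pvSearchB : List Char → Bool
  | [] => pvPatternsB.any (fun p => p.isPrefixOf [])
  | c :: rest => pvPatternsB.any (fun p => p.isPrefixOf (c :: rest)) || pvSearchB rest

def xpia_scan_cached_result_py_alt (content : String) : Bool :=
  !(pvSearchB (PySem.Str.lower content).toList)

-- ===== PRECONDITION & SPEC =====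
def Spec_xpia_scan_cached_result_py (content : String) (out : Bool) : Prop := out = xpia_scan_cached_result_py_alt content
instance (content : String) (out : Bool) : Decidable (Spec_xpia_scan_cached_result_py content out) := by unfold Spec_xpia_scan_cached_result_py; infer_instance

-- ===== CLAIM (what is proved, stated in full; the proofs are below) =====
def Claim_equal_xpia_scan_cached_result_py : Prop := ∀ (content : String), Dom_xpia_scan_cached_result_py content → Spec_xpia_scan_cached_result_py content (xpia_scan_cached_result_py content)

-- ===== LEMMAS AND PROOFS =====

-- B's pass finds a match iff some pattern is a prefix of some suffix
theorem pvSearchB_iff (cs : List Char) :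
    pvSearchB cs = true ↔ ∃ p ∈ pvPatternsB, ∃ j, p <+: cs.drop j := by
  induction cs with
  | nil =>
    simp [pvSearchB]
  | cons c rest ih =>
    simp only [pvSearchB, Bool.or_eq_true, ih, List.any_eq_true,
      List.isPrefixOf_iff_prefix]
    constructor
    · rintro (⟨p, hp, hpre⟩ | ⟨p, hp, j, hpre⟩)
      · exact ⟨p, hp, 0, by simpa using hpre⟩
      · exact ⟨p, hp, j + 1, by simpa using hpre⟩
    · rintro ⟨p, hp, j, hpre⟩
      cases j with
      | zero => exact Or.inl ⟨p, hp, by simpa using hpre⟩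
      | succ j => exact Or.inr ⟨p, hp, j, by simpa using hpre⟩

-- B's pass is equivalent to 'some pattern occurs as a substring'
theorem pvSearchB_eq_any_isIn (cs : List Char) :
    pvSearchB cs = pvPatternsB.any (fun p => PySem.Chars.isIn p cs) := by
  rw [Bool.eq_iff_iff, pvSearchB_iff, List.any_eq_true]
  constructor
  · rintro ⟨p, hp, hj⟩
    exact ⟨p, hp, (PySem.Chars.exists_prefix_drop_iff_isIn p cs).mp hj⟩
  · rintro ⟨p, hp, h⟩
    exact ⟨p, hp, (PySem.Chars.exists_prefix_drop_iff_isIn p cs).mpr h⟩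

-- A's loop returns true iff no pattern is contained
theorem pvScanLoopA_eq (patterns : List String) (s : String) :
    pvScanLoopA patterns s = !patterns.any (fun p => PySem.Str.isIn p s) := by
  induction patterns with
  | nil => simp [pvScanLoopA]
  | cons p rest ih =>
    cases h : PySem.Str.isIn p s
    · simp only [pvScanLoopA, h, Bool.false_eq_true, if_false, List.any_cons,
        Bool.false_or, ih]
    · simp only [pvScanLoopA, h, if_true, List.any_cons, Bool.true_or, Bool.not_true]

-- ===== VERDICT (by name: the statement is the Claim_ definition above) =====
theorem xpia_scan_cached_result_py_spec : Claim_equal_xpia_scan_cached_result_py := by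
  intro content _
  show xpia_scan_cached_result_py content = xpia_scan_cached_result_py_alt content
  unfold xpia_scan_cached_result_py xpia_scan_cached_result_py_alt
  rw [pvScanLoopA_eq, pvSearchB_eq_any_isIn]
  simp [pvPatternsA, pvPatternsB, PySem.Str.isIn_eq]
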